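-- pv_equiv track=rewrite | github.com/s0b0lev/cuddly-lamp | backend/game/services/board.py | mark_row_right
-- ===== SOURCE A (Python) =====
-- def mark_row_right(row, marker):
--     updated = False
--     counter = len(row) - 1
--     for value in row[::-1]:
--         if value == 0:
--             row[counter] = marker
--             updated = True
--             break
--         counter -= 1
--     return row, updated
-- ===== SOURCE B (Python) =====
-- def mark_row_right(row, marker):
--     last = -1
--     for i, value in enumerate(row):
--         if value == 0:
--             last = i
--     if last >= 0:
--         row[last] = marker
--         return row, True
--     return row, False
-- ===== Notes on version B (the rewrite author's own statement) =====
-- stated objective: alternative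
-- what changed: B scans the row left-to-right with enumerate, tracking the index of the last zero seen, and marks once after the loop, instead of A's reversed-iteration with a decrementing counter, in-loop mutation and break.
import Mathlib
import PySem

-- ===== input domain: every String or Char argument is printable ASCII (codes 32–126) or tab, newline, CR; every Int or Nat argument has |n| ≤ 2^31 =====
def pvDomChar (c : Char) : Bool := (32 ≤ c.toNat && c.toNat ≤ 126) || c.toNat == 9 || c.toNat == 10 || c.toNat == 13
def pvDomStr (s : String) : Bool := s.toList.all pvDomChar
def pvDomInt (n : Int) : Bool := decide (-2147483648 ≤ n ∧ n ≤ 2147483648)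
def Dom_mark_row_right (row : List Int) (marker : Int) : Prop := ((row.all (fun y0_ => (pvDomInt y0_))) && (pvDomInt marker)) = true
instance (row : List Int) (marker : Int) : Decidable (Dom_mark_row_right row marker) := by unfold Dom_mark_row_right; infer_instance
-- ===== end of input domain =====

-- B replaces A's reversed scan + in-loop mutation + break with a single left-to-right
-- pass tracking the last zero's index and one post-loop write (objective: alternative).
-- A mutates `row` in place; the equivalence proved here is about the RETURN value only.

-- ===== PORT A =====
-- the loop `for value in row[::-1]: … break`; `counter` is the Python int counter.
-- When the branch fires, 0 ≤ counter < len row (counter = len-1 minus steps taken),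
-- so `row[counter] = marker` is exactly `row.set counter.toNat marker`.
def markLoopA (marker : Int) : List Int → Int → List Int → List Int × Bool
  | [], _, row => (row, false)
  | v :: rest, counter, row =>
      if v == 0 then (row.set counter.toNat marker, true)
      else markLoopA marker rest (counter - 1) row

-- row[::-1] is row.reverse (PySem.List.slice with step -1)
def mark_row_right (row : List Int) (marker : Int) : List Int × Bool :=
  markLoopA marker row.reverse ((row.length : Int) - 1) row

-- ===== PORT B =====
-- `last = -1; for i, value in enumerate(row): if value == 0: last = i`, then one write.
-- `last ≥ 0` implies last < len row, so `row[last] = marker` is `row.set last.toNat marker`.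
def mark_row_right_alt (row : List Int) (marker : Int) : List Int × Bool :=
  let last : Int :=
    (PySem.List.enumerate row).foldl (fun acc p => if p.2 == 0 then p.1 else acc) (-1)
  if last ≥ 0 then (row.set last.toNat marker, true) else (row, false)

-- ===== PRECONDITION & SPEC =====
def Spec_mark_row_right (row : List Int) (marker : Int) (out : List Int × Bool) : Prop := out = mark_row_right_alt row marker
instance (row : List Int) (marker : Int) (out : List Int × Bool) : Decidable (Spec_mark_row_right row marker out) := by unfold Spec_mark_row_right; infer_instance

-- ===== CLAIM (what is proved, stated in full; the proofs are below) =====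
def Claim_equal_mark_row_right : Prop := ∀ (row : List Int) (marker : Int), Dom_mark_row_right row marker → Spec_mark_row_right row marker (mark_row_right row marker)

-- ===== LEMMAS AND PROOFS =====

-- A's loop: result determined by the first zero in the scanned (reversed) list.
theorem markLoopA_eq (marker : Int) (l : List Int) (counter : Int) (row : List Int) :
    markLoopA marker l counter row =
      match l.findIdx? (fun v => v == 0) with
      | none => (row, false)
      | some j => (row.set (counter - j).toNat marker, true) := by
  induction l generalizing counter with
  | nil => simp [markLoopA]
  | cons v rest ih =>
      by_cases h : v = 0
      · simp [markLoopA, h, List.findIdx?_cons]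
      · simp only [markLoopA, List.findIdx?_cons, beq_iff_eq, h, if_false,
          ih (counter - 1)]
        cases hf : rest.findIdx? (fun v => v == 0) with
        | none => simp
        | some j =>
            simp only [Option.map_some]
            have : counter - 1 - (j : Int) = counter - ((j : Nat) + 1 : Nat) := by
              push_cast; ring
            rw [this]

-- B's fold: the tracked `last` is determined by the first zero of row.reverse.
theorem bFold_eq (row : List Int) (init : Int) :
    (PySem.List.enumerate row).foldl (fun acc p => if p.2 == 0 then p.1 else acc) init =
      match row.reverse.findIdx? (fun v => v == 0) with
      | none => init
      | some j => (row.length : Int) - 1 - j := by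
  induction row using List.reverseRecOn with
  | nil => simp
  | append_singleton xs x ih =>
      rw [PySem.List.enumerate_append, List.foldl_append, ih, List.reverse_append]
      simp only [List.reverse_singleton, List.singleton_append, List.findIdx?_cons,
        PySem.List.enumerate_cons, PySem.List.enumerate_nil, List.foldl_cons, List.foldl_nil]
      by_cases h : x = 0
      · simp only [h, beq_self_eq_true, if_pos]
        simp [List.length_append]
      · simp only [beq_iff_eq, h, if_false]
        cases hf : xs.reverse.findIdx? (fun v => v == 0) with
        | none => simp
        | some j =>
            simp only [Option.map_some, List.length_append, List.length_singleton]
            push_cast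
            ring_nf

-- ===== VERDICT (by name: the statement is the Claim_ definition above) =====
theorem mark_row_right_spec : Claim_equal_mark_row_right := by
  intro row marker _
  unfold Spec_mark_row_right mark_row_right mark_row_right_alt
  rw [markLoopA_eq]
  simp only [bFold_eq]
  cases hf : row.reverse.findIdx? (fun v => v == 0) with
  | none => norm_num
  | some j =>
      have hj : j < row.length := by
        have h1 := (List.findIdx?_eq_some_iff_findIdx_eq.mp hf).1
        simpa using h1
      have hge : ((row.length : Int) - 1 - j) ≥ 0 := by
        have h2 : (j : Int) < (row.length : Int) := by exact_mod_cast hj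
        omega
      rw [if_pos hge]
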